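-- pv_equiv track=rewrite | github.com/stojan97/advent-of-code-2021 | day-13/solution.py | fold_it
-- ===== SOURCE A (Python) =====
-- def fold_it(points, folds):
--
--     final_points = set(points)
--
--     for coord, val in folds:
--         if coord == 'y':
--             for y, x in set(final_points):
--                 if y > val:
--                     next_y = val - (y - val)
--                     final_points.remove((y, x))
--                     final_points.add((next_y, x))
--
--         if coord == 'x':
--             for y, x in set(final_points):
--                 if x > val:
--                     next_x = val - (x - val)
--                     final_points.remove((y, x))
--                     final_points.add((y, next_x))
--
--     return final_points
-- ===== SOURCE B (Python) =====
-- def fold_it(points, folds):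
--     # Point-major: thread each point independently through all fold
--     # instructions, then collect the fully-folded points into a set.
--     result = set()
--     for y, x in points:
--         for coord, val in folds:
--             if coord == 'y' and y > val:
--                 y = 2 * val - y
--             elif coord == 'x' and x > val:
--                 x = 2 * val - x
--         result.add((y, x))
--     return result
-- ===== Notes on version B (the rewrite author's own statement) =====
-- stated objective: alternative
-- what changed: Point-major instead of fold-major: each point is threaded independently through the whole fold list as a pure coordinate transformation and the results are collected into a fresh set, replacing A's per-fold snapshot iteration with remove/add mutation of one shared set; correct because every fold maps points independently and the set dedups collisions identically.
import Mathlib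
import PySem

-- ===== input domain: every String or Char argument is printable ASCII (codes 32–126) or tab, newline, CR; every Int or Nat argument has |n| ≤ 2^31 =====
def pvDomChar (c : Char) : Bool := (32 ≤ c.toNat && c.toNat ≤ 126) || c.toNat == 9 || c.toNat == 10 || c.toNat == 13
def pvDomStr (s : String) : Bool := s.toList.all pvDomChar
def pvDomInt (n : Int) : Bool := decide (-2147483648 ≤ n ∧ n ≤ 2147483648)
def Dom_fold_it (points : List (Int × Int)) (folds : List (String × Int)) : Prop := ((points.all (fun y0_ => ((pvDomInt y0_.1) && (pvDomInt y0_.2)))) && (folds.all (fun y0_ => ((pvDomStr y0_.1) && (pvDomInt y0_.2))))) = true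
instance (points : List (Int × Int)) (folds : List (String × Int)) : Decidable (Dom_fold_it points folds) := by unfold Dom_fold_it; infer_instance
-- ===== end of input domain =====

-- B is point-major: it threads each point independently through all fold instructions and
-- collects the results into a fresh set, instead of A's fold-major remove/add mutation of
-- one shared set (alternative decomposition, same cost).
--
-- MODELLING NOTE (applies to BOTH ports identically): the Python function returns a SET of
-- pairs, whose iteration order is not modelled by PySem; each port therefore returns the
-- canonical lexicographically sorted representative (pvCanon) of the set its Python
-- computes — exact as a set, which is how set-typed results are compared.

-- canonical representative of a set of pairs: its lexicographically sorted element list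
def pvLe (a b : Int × Int) : Bool := a.1 < b.1 || (a.1 == b.1 && a.2 ≤ b.2)

def pvCanon (l : List (Int × Int)) : List (Int × Int) := l.mergeSort pvLe

-- ===== PORT A =====
-- body of A's 'for coord, val in folds' loop; the inner loops iterate a snapshot of the set
def aFoldStep (final_points : List (Int × Int)) (cv : String × Int) : List (Int × Int) :=
  let final_points :=
    if cv.1 == "y" then
      -- Python's set.remove is exact here as discard: the removed point comes from the
      -- snapshot and is still present (only points beyond the line are removed, while
      -- every added reflection lies strictly below it)
      final_points.foldl (fun cur yx =>
        if yx.1 > cv.2 then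
          PySem.Set.add (PySem.Set.discard cur yx) (cv.2 - (yx.1 - cv.2), yx.2)
        else cur) final_points
    else final_points
  if cv.1 == "x" then
    final_points.foldl (fun cur yx =>
      if yx.2 > cv.2 then
        PySem.Set.add (PySem.Set.discard cur yx) (yx.1, cv.2 - (yx.2 - cv.2))
      else cur) final_points
  else final_points

def fold_it (points : List (Int × Int)) (folds : List (String × Int)) : List (Int × Int) :=
  pvCanon (folds.foldl aFoldStep (PySem.Set.ofList points))

-- ===== PORT B =====
-- body of B's inner 'for coord, val in folds' loop: one point through one instruction
def bStep (yx : Int × Int) (cv : String × Int) : Int × Int :=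
  if cv.1 = "y" ∧ yx.1 > cv.2 then (2 * cv.2 - yx.1, yx.2)
  else if cv.1 = "x" ∧ yx.2 > cv.2 then (yx.1, 2 * cv.2 - yx.2)
  else yx

-- one point threaded through the whole fold list
def bThread (folds : List (String × Int)) (p : Int × Int) : Int × Int :=
  folds.foldl bStep p

def fold_it_alt (points : List (Int × Int)) (folds : List (String × Int)) : List (Int × Int) :=
  pvCanon (points.foldl (fun result p => PySem.Set.add result (bThread folds p)) PySem.Set.empty)

-- ===== PRECONDITION & SPEC =====
def Spec_fold_it (points : List (Int × Int)) (folds : List (String × Int)) (out : List (Int × Int)) : Prop := out = fold_it_alt points folds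
instance (points : List (Int × Int)) (folds : List (String × Int)) (out : List (Int × Int)) : Decidable (Spec_fold_it points folds out) := by unfold Spec_fold_it; infer_instance

-- ===== CLAIM (what is proved, stated in full; the proofs are below) =====
def Claim_equal_fold_it : Prop := ∀ (points : List (Int × Int)) (folds : List (String × Int)), Dom_fold_it points folds → Spec_fold_it points folds (fold_it points folds)

-- ===== LEMMAS AND PROOFS =====

-- pvCanon is invariant under permutation (pvLe is a total antisymmetric transitive order)
lemma pvCanon_eq_of_perm (l₁ l₂ : List (Int × Int)) (h : l₁.Perm l₂) :
    pvCanon l₁ = pvCanon l₂ := by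
  have htrans : ∀ a b c : Int × Int, pvLe a b = true → pvLe b c = true → pvLe a c = true := by
    intro a b c h1 h2
    simp only [pvLe, Bool.or_eq_true, Bool.and_eq_true, decide_eq_true_eq, beq_iff_eq] at *
    omega
  have htotal : ∀ a b : Int × Int, (pvLe a b || pvLe b a) = true := by
    intro a b
    simp only [pvLe, Bool.or_eq_true, Bool.and_eq_true, decide_eq_true_eq, beq_iff_eq]
    omega
  have hanti : ∀ a b : Int × Int, pvLe a b = true → pvLe b a = true → a = b := by
    intro a b h1 h2
    simp only [pvLe, Bool.or_eq_true, Bool.and_eq_true, decide_eq_true_eq, beq_iff_eq] at h1 h2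
    obtain ⟨a1, a2⟩ := a; obtain ⟨b1, b2⟩ := b
    simp only [Prod.mk.injEq]
    constructor <;> omega
  exact List.Perm.eq_of_pairwise (fun a b _ _ => hanti a b)
    (List.pairwise_mergeSort htrans htotal l₁)
    (List.pairwise_mergeSort htrans htotal l₂)
    (((l₁.mergeSort_perm pvLe).trans h).trans (l₂.mergeSort_perm pvLe).symm)

-- membership in A's inner loop (snapshot iteration with remove/add on the evolving set):
-- the elements that do not satisfy P stay, each P-element of the snapshot contributes r p
lemma loop_mem (P : (Int × Int) → Prop) [DecidablePred P] (r : (Int × Int) → (Int × Int))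
    (hr : ∀ p, P p → ¬ P (r p)) :
    ∀ (l c : List (Int × Int)), l.Nodup → (∀ p, P p → (p ∈ c ↔ p ∈ l)) → ∀ q,
      (q ∈ l.foldl (fun cur p => if P p then PySem.Set.add (PySem.Set.discard cur p) (r p) else cur) c)
        ↔ ((q ∈ c ∧ ¬ P q) ∨ ∃ p ∈ l, P p ∧ r p = q) := by
  intro l
  induction l with
  | nil =>
    intro c _ hc q
    simp only [List.foldl_nil, List.not_mem_nil, false_and, exists_false, or_false]
    constructor
    · intro h
      refine ⟨h, fun hP => ?_⟩
      have := (hc q hP).mp h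
      simp at this
    · exact fun h => h.1
  | cons p t ih =>
    intro c hl hc q
    obtain ⟨hpt, ht⟩ := List.nodup_cons.mp hl
    simp only [List.foldl_cons]
    by_cases hP : P p
    · rw [if_pos hP]
      have hrP : ¬ P (r p) := hr p hP
      have hc' : ∀ p', P p' → (p' ∈ PySem.Set.add (PySem.Set.discard c p) (r p) ↔ p' ∈ t) := by
        intro p' hp'
        rw [PySem.Set.mem_add, PySem.Set.mem_discard]
        constructor
        · rintro (⟨hpc, hne⟩ | rfl)
          · have := (hc p' hp').mp hpc
            rcases List.mem_cons.mp this with rfl | h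
            · exact absurd rfl hne
            · exact h
          · exact absurd hp' hrP
        · intro hmem
          have hne : p' ≠ p := fun h => hpt (h ▸ hmem)
          exact Or.inl ⟨(hc p' hp').mpr (List.mem_cons_of_mem _ hmem), hne⟩
      rw [ih _ ht hc' q]
      rw [PySem.Set.mem_add, PySem.Set.mem_discard]
      constructor
      · rintro (⟨(⟨hqc, _⟩ | rfl), hnq⟩ | ⟨p', hp', hPp', hrp'⟩)
        · exact Or.inl ⟨hqc, hnq⟩
        · exact Or.inr ⟨p, List.mem_cons_self, hP, rfl⟩
        · exact Or.inr ⟨p', List.mem_cons_of_mem _ hp', hPp', hrp'⟩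
      · rintro (⟨hqc, hnq⟩ | ⟨p', hp', hPp', hrp'⟩)
        · have hne : q ≠ p := fun h => hnq (h ▸ hP)
          exact Or.inl ⟨Or.inl ⟨hqc, hne⟩, hnq⟩
        · rcases List.mem_cons.mp hp' with rfl | hp't
          · exact Or.inl ⟨Or.inr hrp'.symm, hrp' ▸ hr p' hPp'⟩
          · exact Or.inr ⟨p', hp't, hPp', hrp'⟩
    · rw [if_neg hP]
      have hc' : ∀ p', P p' → (p' ∈ c ↔ p' ∈ t) := by
        intro p' hp'
        rw [hc p' hp', List.mem_cons]
        constructor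
        · rintro (rfl | h)
          · exact absurd hp' hP
          · exact h
        · exact Or.inr
      rw [ih _ ht hc' q]
      constructor
      · rintro (h | ⟨p', hp', hPp', hrp'⟩)
        · exact Or.inl h
        · exact Or.inr ⟨p', List.mem_cons_of_mem _ hp', hPp', hrp'⟩
      · rintro (h | ⟨p', hp', hPp', hrp'⟩)
        · exact Or.inl h
        · rcases List.mem_cons.mp hp' with rfl | hp't
          · exact absurd hPp' hP
          · exact Or.inr ⟨p', hp't, hPp', hrp'⟩

-- A's inner loop keeps the set duplicate-free
lemma loop_nodup (P : (Int × Int) → Prop) [DecidablePred P] (r : (Int × Int) → (Int × Int)) :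
    ∀ (l c : List (Int × Int)), c.Nodup →
      (l.foldl (fun cur p => if P p then PySem.Set.add (PySem.Set.discard cur p) (r p) else cur) c).Nodup := by
  intro l
  induction l with
  | nil => intro c h; exact h
  | cons p t ih =>
    intro c h
    simp only [List.foldl_cons]
    by_cases hP : P p
    · rw [if_pos hP]
      exact ih _ (PySem.Set.nodup_add _ _ (PySem.Set.nodup_discard _ _ h))
    · rw [if_neg hP]; exact ih _ h

-- one step of A's outer loop = the image of the set under B's one-instruction map
lemma step_mem (s : List (Int × Int)) (hs : s.Nodup) (cv : String × Int) (q : Int × Int) :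
    q ∈ aFoldStep s cv ↔ ∃ p ∈ s, bStep p cv = q := by
  unfold aFoldStep
  by_cases hy : cv.1 = "y"
  · have hyb : (cv.1 == "y") = true := by simp [hy]
    have hxb : (cv.1 == "x") = false := by rw [hy]; decide
    have hxp : ¬ cv.1 = "x" := by rw [hy]; decide
    simp only [hyb, hxb, if_true, Bool.false_eq_true, if_false]
    rw [loop_mem (fun p => p.1 > cv.2) (fun p => (cv.2 - (p.1 - cv.2), p.2))
      (fun p hp => by simp only [gt_iff_lt, not_lt] at *; omega) s s hs (fun _ _ => Iff.rfl) q]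
    constructor
    · rintro (⟨hq, hnq⟩ | ⟨p, hp, hPp, rfl⟩)
      · refine ⟨q, hq, ?_⟩
        unfold bStep
        rw [if_neg (fun h => hnq h.2), if_neg (fun h => hxp h.1)]
      · refine ⟨p, hp, ?_⟩
        unfold bStep
        rw [if_pos ⟨hy, hPp⟩]
        simp only [Prod.mk.injEq]
        exact ⟨by omega, trivial⟩
    · rintro ⟨p, hp, rfl⟩
      by_cases hPp : p.1 > cv.2
      · refine Or.inr ⟨p, hp, hPp, ?_⟩
        unfold bStep
        rw [if_pos ⟨hy, hPp⟩]
        simp only [Prod.mk.injEq]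
        exact ⟨by omega, trivial⟩
      · refine Or.inl ⟨?_, ?_⟩ <;> unfold bStep <;>
          rw [if_neg (fun h => hPp h.2), if_neg (fun h => hxp h.1)]
        · exact hp
        · exact hPp
  · have hyb : (cv.1 == "y") = false := by simpa using hy
    simp only [hyb, Bool.false_eq_true, if_false]
    by_cases hx : cv.1 = "x"
    · have hxb : (cv.1 == "x") = true := by simp [hx]
      simp only [hxb, if_true]
      rw [loop_mem (fun p => p.2 > cv.2) (fun p => (p.1, cv.2 - (p.2 - cv.2)))
        (fun p hp => by simp only [gt_iff_lt, not_lt] at *; omega) s s hs (fun _ _ => Iff.rfl) q]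
      constructor
      · rintro (⟨hq, hnq⟩ | ⟨p, hp, hPp, rfl⟩)
        · refine ⟨q, hq, ?_⟩
          unfold bStep
          rw [if_neg (fun h => hy h.1), if_neg (fun h => hnq h.2)]
        · refine ⟨p, hp, ?_⟩
          unfold bStep
          rw [if_neg (fun h => hy h.1), if_pos ⟨hx, hPp⟩]
          simp only [Prod.mk.injEq]
          exact ⟨trivial, by omega⟩
      · rintro ⟨p, hp, rfl⟩
        by_cases hPp : p.2 > cv.2
        · refine Or.inr ⟨p, hp, hPp, ?_⟩
          unfold bStep
          rw [if_neg (fun h => hy h.1), if_pos ⟨hx, hPp⟩]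
          simp only [Prod.mk.injEq]
          exact ⟨trivial, by omega⟩
        · refine Or.inl ⟨?_, ?_⟩ <;> unfold bStep <;>
            rw [if_neg (fun h => hy h.1), if_neg (fun h => hPp h.2)]
          · exact hp
          · exact hPp
    · have hxb : (cv.1 == "x") = false := by simpa using hx
      simp only [hxb, Bool.false_eq_true, if_false]
      constructor
      · intro hq
        refine ⟨q, hq, ?_⟩
        unfold bStep
        rw [if_neg (fun h => hy h.1), if_neg (fun h => hx h.1)]
      · rintro ⟨p, hp, rfl⟩
        have : bStep p cv = p := by
          unfold bStep
          rw [if_neg (fun h => hy h.1), if_neg (fun h => hx h.1)]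
        rw [this]; exact hp

-- A's outer-loop step keeps the set duplicate-free
lemma step_nodup (s : List (Int × Int)) (hs : s.Nodup) (cv : String × Int) :
    (aFoldStep s cv).Nodup := by
  unfold aFoldStep
  by_cases hy : (cv.1 == "y") = true <;> by_cases hx : (cv.1 == "x") = true <;>
    simp only [hy, hx, if_true, Bool.false_eq_true, if_false] <;>
    first
      | exact loop_nodup _ _ _ _ (loop_nodup _ _ _ _ hs)
      | exact loop_nodup _ _ _ _ hs
      | exact hs

-- membership in A's whole fold = image of the start set under B's threading map
lemma fold_mem : ∀ (folds : List (String × Int)) (s : List (Int × Int)), s.Nodup → ∀ q,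
    (q ∈ folds.foldl aFoldStep s ↔ ∃ p ∈ s, bThread folds p = q) := by
  intro folds
  induction folds with
  | nil =>
    intro s _ q
    simp [bThread]
  | cons cv fs ih =>
    intro s hs q
    simp only [List.foldl_cons]
    rw [ih _ (step_nodup s hs cv) q]
    constructor
    · rintro ⟨p', hp', hth⟩
      obtain ⟨p, hp, rfl⟩ := (step_mem s hs cv p').mp hp'
      exact ⟨p, hp, hth⟩
    · rintro ⟨p, hp, hth⟩
      exact ⟨bStep p cv, (step_mem s hs cv _).mpr ⟨p, hp, rfl⟩, hth⟩

lemma fold_nodup : ∀ (folds : List (String × Int)) (s : List (Int × Int)), s.Nodup →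
    (folds.foldl aFoldStep s).Nodup := by
  intro folds
  induction folds with
  | nil => intro s h; exact h
  | cons cv fs ih => intro s h; exact ih _ (step_nodup s h cv)

-- ===== VERDICT (by name: the statement is the Claim_ definition above) =====
theorem fold_it_spec : Claim_equal_fold_it := by
  intro points folds _
  unfold Spec_fold_it fold_it fold_it_alt
  apply pvCanon_eq_of_perm
  have hA : (folds.foldl aFoldStep (PySem.Set.ofList points)).Nodup :=
    fold_nodup folds _ (PySem.Set.nodup_ofList points)
  have hBeq : points.foldl (fun result p => PySem.Set.add result (bThread folds p)) PySem.Set.empty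
      = PySem.Set.update PySem.Set.empty (points.map (bThread folds)) :=
    (PySem.Set.update_map_eq_foldl_add _ _ _).symm
  have hB : (points.foldl (fun result p => PySem.Set.add result (bThread folds p)) PySem.Set.empty).Nodup := by
    rw [hBeq]
    exact PySem.Set.nodup_update _ _ List.nodup_nil
  rw [List.perm_ext_iff_of_nodup hA hB]
  intro q
  rw [fold_mem folds _ (PySem.Set.nodup_ofList points) q,
    PySem.Set.mem_foldl_add points (bThread folds) PySem.Set.empty q]
  simp only [PySem.Set.mem_ofList, PySem.Set.empty, List.not_mem_nil, false_or]
  constructor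
  · rintro ⟨p, hp, h⟩; exact ⟨p, hp, h.symm⟩
  · rintro ⟨p, hp, h⟩; exact ⟨p, hp, h.symm⟩
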